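-- pv_equiv track=rewrite | github.com/ggangwan/brotli-summer-project | segregate_files.py | get_size_bucket
-- ===== SOURCE A (Python) =====
-- def get_size_bucket(file_size):
--     if file_size < 64 * 1024:
--         return "64"
--     bucket_start = 64
--     while bucket_start * 1024 <= file_size:
--         bucket_start *= 2
--     bucket_end = bucket_start
--     bucket_start //= 2
--     return f"{bucket_start}-{bucket_end}"
-- ===== SOURCE B (Python) =====
-- def get_size_bucket(file_size):
--     if file_size < 64 * 1024:
--         return "64"
--     m = file_size.bit_length()
--     return f"{1 << (m - 11)}-{1 << (m - 10)}"
-- ===== Notes on version B (the rewrite author's own statement) =====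
-- stated objective: simpler
-- what changed: Replaces A's doubling while-loop with a closed-form computation of the bucket bounds from file_size.bit_length() (two shifts instead of a loop).
import Mathlib
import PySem

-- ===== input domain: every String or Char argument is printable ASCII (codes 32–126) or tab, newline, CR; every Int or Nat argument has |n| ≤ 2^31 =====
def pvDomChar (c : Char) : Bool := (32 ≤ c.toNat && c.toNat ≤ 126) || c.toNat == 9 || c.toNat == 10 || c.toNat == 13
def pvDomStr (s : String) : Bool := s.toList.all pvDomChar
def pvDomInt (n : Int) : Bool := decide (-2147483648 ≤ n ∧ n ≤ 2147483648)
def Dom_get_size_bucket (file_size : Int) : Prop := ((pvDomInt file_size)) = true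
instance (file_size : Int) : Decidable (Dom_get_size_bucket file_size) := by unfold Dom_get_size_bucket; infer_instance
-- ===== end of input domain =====

-- B computes the power-of-two bucket label in closed form from bit_length instead of A's doubling loop (simpler).


-- ===== PORT A =====
-- A's while loop; the '0 < bs' conjunct is only a totality guard (A always enters the loop with bs = 64 > 0)
def getSizeBucketLoop (file_size bs : Int) : Int :=
  if h : 0 < bs ∧ bs * 1024 ≤ file_size then getSizeBucketLoop file_size (bs * 2) else bs
termination_by (file_size + 1 - bs * 1024).toNat
decreasing_by omega

def get_size_bucket (file_size : Int) : String :=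
  if file_size < 64 * 1024 then "64"
  else
    let bucket_end := getSizeBucketLoop file_size 64
    let bucket_start := PySem.Int.floordiv bucket_end 2
    PySem.Int.toStr bucket_start ++ "-" ++ PySem.Int.toStr bucket_end

-- ===== PORT B =====
-- PySem.Int.bitLength = Python's int.bit_length (exact); 1 <<< n = Python's 1 << n on these Nat exponents
def get_size_bucket_alt (file_size : Int) : String :=
  if file_size < 64 * 1024 then "64"
  else
    let m := PySem.Int.bitLength file_size
    PySem.Int.toStr ((1 <<< (m - 11) : Nat) : Int) ++ "-" ++ PySem.Int.toStr ((1 <<< (m - 10) : Nat) : Int)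

-- ===== PRECONDITION & SPEC =====
def Spec_get_size_bucket (file_size : Int) (out : String) : Prop := out = get_size_bucket_alt file_size
instance (file_size : Int) (out : String) : Decidable (Spec_get_size_bucket file_size out) := by unfold Spec_get_size_bucket; infer_instance

-- ===== CLAIM (what is proved, stated in full; the proofs are below) =====
def Claim_equal_get_size_bucket : Prop := ∀ (file_size : Int), Dom_get_size_bucket file_size → Spec_get_size_bucket file_size (get_size_bucket file_size)

-- ===== LEMMAS AND PROOFS =====

-- the loop started at 2^k returns 2^(i+1), where [2^i·1024, 2^(i+1)·1024) is the interval containing file_size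
theorem getSizeBucketLoop_pow (fs : Int) (i : Nat)
    (hlo : (2 ^ i : Int) * 1024 ≤ fs) (hhi : fs < 2 ^ (i + 1) * 1024) :
    ∀ d k, k + d = i → getSizeBucketLoop fs (2 ^ k) = 2 ^ (i + 1) := by
  intro d
  induction d with
  | zero =>
    intro k hk
    have hki : k = i := by omega
    subst hki
    rw [getSizeBucketLoop.eq_def, dif_pos ⟨by positivity, hlo⟩]
    rw [(by ring : (2:Int) ^ k * 2 = 2 ^ (k + 1))]
    rw [getSizeBucketLoop.eq_def, dif_neg]
    rintro ⟨-, h⟩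
    omega
  | succ d ih =>
    intro k hk
    have hle : (2 ^ k : Int) * 1024 ≤ fs := by
      have h2 : (2:Int) ^ k ≤ 2 ^ i := pow_le_pow_right₀ (by norm_num) (by omega)
      nlinarith
    rw [getSizeBucketLoop.eq_def, dif_pos ⟨by positivity, hle⟩]
    rw [(by ring : (2:Int) ^ k * 2 = 2 ^ (k + 1))]
    exact ih (k + 1) (by omega)

-- ===== VERDICT (by name: the statement is the Claim_ definition above) =====
theorem get_size_bucket_spec : Claim_equal_get_size_bucket := by
  intro fs _
  unfold Spec_get_size_bucket get_size_bucket get_size_bucket_alt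
  by_cases hlt : fs < 64 * 1024
  · rw [if_pos hlt, if_pos hlt]
  · rw [if_neg hlt, if_neg hlt]
    have hfs : (65536 : Int) ≤ fs := by omega
    set m := PySem.Int.bitLength fs with hm
    have hup : fs.natAbs < 2 ^ m := PySem.Int.lt_two_pow_bitLength fs
    have hlo : 2 ^ (m - 1) ≤ fs.natAbs := PySem.Int.two_pow_bitLength_le fs (by omega)
    have hm17 : 17 ≤ m := by
      by_contra h
      have h1 : fs.natAbs < 2 ^ 16 :=
        lt_of_lt_of_le hup (Nat.pow_le_pow_right (by norm_num) (by omega))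
      have : fs.natAbs < 65536 := by norm_num at h1; omega
      omega
    obtain ⟨j, hj⟩ : ∃ j, m = j + 17 := ⟨m - 17, by omega⟩
    have hlo' : ((2 ^ (j + 16) : Nat) : Int) ≤ fs := by
      rw [(by omega : j + 16 = m - 1)]; omega
    have hup' : fs < ((2 ^ (j + 17) : Nat) : Int) := by
      rw [← hj]; omega
    have hcast_lo : (2 ^ (j + 6) : Int) * 1024 ≤ fs := by
      have he : (2 ^ (j + 6) : Int) * 1024 = ((2 ^ (j + 16) : Nat) : Int) := by
        push_cast [pow_add]; ring
      rw [he]; exact hlo'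
    have hcast_hi : fs < (2 ^ (j + 6 + 1) : Int) * 1024 := by
      have he : (2 ^ (j + 6 + 1) : Int) * 1024 = ((2 ^ (j + 17) : Nat) : Int) := by
        push_cast [pow_add]; ring
      rw [he]; exact hup'
    have hloop : getSizeBucketLoop fs 64 = 2 ^ (j + 7) := by
      have h64 : (64 : Int) = 2 ^ (6 : Nat) := by norm_num
      rw [h64]
      have := getSizeBucketLoop_pow fs (j + 6) hcast_lo hcast_hi j 6 (by omega)
      rw [this]
    have hdiv : PySem.Int.floordiv (2 ^ (j + 7)) 2 = 2 ^ (j + 6) := by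
      rw [PySem.Int.floordiv_eq_ediv_of_pos (by norm_num)]
      rw [(by ring : (2:Int) ^ (j + 7) = 2 ^ (j + 6) * 2)]
      exact Int.mul_ediv_cancel _ (by norm_num)
    have e1 : ((1 <<< (m - 11) : Nat) : Int) = 2 ^ (j + 6) := by
      rw [Nat.one_shiftLeft, (by omega : m - 11 = j + 6)]; push_cast; ring
    have e2 : ((1 <<< (m - 10) : Nat) : Int) = 2 ^ (j + 7) := by
      rw [Nat.one_shiftLeft, (by omega : m - 10 = j + 7)]; push_cast; ring
    simp only [hloop, hdiv, e1, e2]
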